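-- pv_equiv track=rewrite | github.com/34suuuuu/algorithm | programmers/WeeklyChallenge03.py | solution
-- ===== SOURCE A (Python) =====
-- def solution(table, languages, preference):
--     score = {}
--     for t in table:
--         for lang, pref in zip(languages, preference):
--             if lang in t.split():
--                 score[t.split()[0]] = (6 - t.split().index(lang)) * \
--                     pref + score.get(t.split()[0], 0)
--
--     sorted_score = sorted(
--         score.items(), key=lambda item: (-item[1], item[0]))
--     return sorted_score[0][0]
-- ===== SOURCE B (Python) =====
-- def solution(table, languages, preference):
--     pref_of = {}
--     for lang, pref in zip(languages, preference):
--         pref_of[lang] = pref_of.get(lang, 0) + pref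
--     score = {}
--     for t in table:
--         toks = t.split()
--         seen = set()
--         delta = 0
--         hit = False
--         for i, tok in enumerate(toks):
--             if tok not in seen:
--                 seen.add(tok)
--                 if tok in pref_of:
--                     hit = True
--                     delta += (6 - i) * pref_of[tok]
--         if hit:
--             score[toks[0]] = score.get(toks[0], 0) + delta
--     return min(score.items(), key=lambda kv: (-kv[1], kv[0]))[0]
-- ===== Notes on version B (the rewrite author's own statement) =====
-- stated objective: faster
-- what changed: A rescans every row once per (language, preference) pair, re-splitting the row four times and running list.index inside the loop; B builds one summed-preference dict over zip(languages, preference) up front and makes a single seen-set pass over each row's tokens, adding (6 - i) * pref at each token's first occurrence.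
import Mathlib
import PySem

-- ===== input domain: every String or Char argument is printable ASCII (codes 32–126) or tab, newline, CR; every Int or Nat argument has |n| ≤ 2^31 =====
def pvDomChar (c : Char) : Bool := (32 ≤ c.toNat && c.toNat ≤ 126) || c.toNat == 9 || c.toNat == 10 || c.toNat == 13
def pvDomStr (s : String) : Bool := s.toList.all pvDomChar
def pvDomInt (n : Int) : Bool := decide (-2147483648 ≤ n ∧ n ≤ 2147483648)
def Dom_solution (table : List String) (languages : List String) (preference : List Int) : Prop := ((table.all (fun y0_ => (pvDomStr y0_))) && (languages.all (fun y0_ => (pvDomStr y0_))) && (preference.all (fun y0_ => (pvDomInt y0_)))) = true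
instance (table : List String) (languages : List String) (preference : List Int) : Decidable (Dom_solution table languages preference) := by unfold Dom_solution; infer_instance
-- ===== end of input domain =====

-- B replaces A's per-(language,pref)-pair rescan of each row (with three redundant re-splits and a
-- .index scan per pair) by one dict of summed preferences per language built up front and one
-- seen-set pass over each row's tokens; equal return value is proved below.

-- ===== PORT A =====
-- literal port of A; 't.split()[0]' and '.index' are reached only under the membership guard,
-- so the guarded '.headD ""' / '.getD 0' defaults are never exercised where Python would raise
def solution (table : List String) (languages : List String) (preference : List Int) : String :=
  let score : PySem.Dict String Int :=
    table.foldl (fun sc t =>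
      (languages.zip preference).foldl (fun sc lp =>
        if (PySem.Str.split₀ t).contains lp.1 then
          sc.insert ((PySem.Str.split₀ t).headD "")
            ((6 - (((PySem.List.index? (PySem.Str.split₀ t) lp.1).getD 0 : Nat) : Int)) * lp.2
              + sc.getD ((PySem.Str.split₀ t).headD "") 0)
        else sc) sc) PySem.Dict.empty
  -- sorted(score.items(), key=lambda item: (-item[1], item[0]))[0][0]; '[0]' raises on an empty
  -- dict (excluded by Pre_), so the '.headD' default is never exercised inside Pre_
  ((PySem.List.sorted2 score.items (fun p => -p.2) (fun p => p.1)).headD ("", 0)).1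

-- ===== PORT B =====
def solution_alt (table : List String) (languages : List String) (preference : List Int) : String :=
  let prefOf : PySem.Dict String Int :=
    (languages.zip preference).foldl (fun d lp => d.insert lp.1 (d.getD lp.1 0 + lp.2)) PySem.Dict.empty
  let score : PySem.Dict String Int :=
    table.foldl (fun sc t =>
      let toks := PySem.Str.split₀ t
      let st := (PySem.List.enumerate toks).foldl
        (fun (st : PySem.Set String × Int × Bool) it =>
          if PySem.Set.contains st.1 it.2 then st
          else if prefOf.contains it.2 then
            (PySem.Set.add st.1 it.2, st.2.1 + (6 - it.1) * prefOf.getD it.2 0, true)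
          else (PySem.Set.add st.1 it.2, st.2.1, st.2.2))
        (PySem.Set.empty, 0, false)
      -- 'toks[0]' is reached only when some token matched, so toks ≠ []
      if st.2.2 then sc.insert (toks.headD "") (sc.getD (toks.headD "") 0 + st.2.1) else sc)
      PySem.Dict.empty
  -- min(score.items(), key=...)[0]; raises on an empty dict (excluded by Pre_)
  ((PySem.List.min2? score.items (fun p => -p.2) (fun p => p.1)).getD ("", 0)).1

-- ===== PRECONDITION & SPEC =====
-- Pre_ excludes exactly the inputs where the score dict stays empty: there Python A raises
-- IndexError (and B raises ValueError); nothing else is excluded.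
def Pre_solution (table : List String) (languages : List String) (preference : List Int) : Prop :=
  ∃ t ∈ table, ∃ lp ∈ languages.zip preference, lp.1 ∈ PySem.Str.split₀ t
instance (table : List String) (languages : List String) (preference : List Int) : Decidable (Pre_solution table languages preference) := by unfold Pre_solution; infer_instance
def pvWitness_solution : List String × List String × List Int :=
  (["java backend junior pizza 150", "python frontend senior chipmunk 180"], ["python", "java"], [7, 5])

def Spec_solution (table : List String) (languages : List String) (preference : List Int) (out : String) : Prop := out = solution_alt table languages preference
instance (table : List String) (languages : List String) (preference : List Int) (out : String) : Decidable (Spec_solution table languages preference out) := by unfold Spec_solution; infer_instance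

-- ===== CLAIM (what is proved, stated in full; the proofs are below) =====
def Claim_equal_solution : Prop := ∀ (table : List String) (languages : List String) (preference : List Int), Dom_solution table languages preference → Pre_solution table languages preference → Spec_solution table languages preference (solution table languages preference)

-- ===== LEMMAS AND PROOFS =====

-- abbreviations for the proofs (not used by the ports)
def pvIdx (toks : List String) (v : String) : Int := (((PySem.List.index? toks v).getD 0 : Nat) : Int)

def pvDeltaA (toks : List String) (pairs : List (String × Int)) : Int :=
  ((pairs.filter (fun lp => toks.contains lp.1)).map (fun lp => (6 - pvIdx toks lp.1) * lp.2)).sum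

def pvDeltaB (d : PySem.Dict String Int) (toks : List String) : Int :=
  ((PySem.List.dedup toks).map (fun tok => (6 - pvIdx toks tok) * d.getD tok 0)).sum

def pvPrefOf (pairs : List (String × Int)) : PySem.Dict String Int :=
  pairs.foldl (fun d lp => d.insert lp.1 (d.getD lp.1 0 + lp.2)) PySem.Dict.empty

-- A's inner loop over the (language, preference) pairs is one conditional insert
lemma rowA_shape (toks : List String) (pairs : List (String × Int)) (sc : PySem.Dict String Int) :
    pairs.foldl (fun sc lp =>
        if toks.contains lp.1 then
          sc.insert (toks.headD "") ((6 - pvIdx toks lp.1) * lp.2 + sc.getD (toks.headD "") 0)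
        else sc) sc
    = if pairs.any (fun lp => toks.contains lp.1) then
        sc.insert (toks.headD "") (pvDeltaA toks pairs + sc.getD (toks.headD "") 0)
      else sc := by
  induction pairs generalizing sc with
  | nil => simp
  | cons lp rest ih =>
    simp only [List.foldl_cons, List.any_cons]
    by_cases h : toks.contains lp.1
    · rw [if_pos h, ih]
      by_cases h2 : rest.any (fun lp => toks.contains lp.1)
      · rw [if_pos h2, if_pos (by simp at h ⊢; exact Or.inl h)]
        rw [PySem.Dict.insert_insert_self, PySem.Dict.getD_insert_self]
        congr 1
        simp only [pvDeltaA, List.filter_cons, h, if_pos, List.map_cons, List.sum_cons]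
        ring
      · rw [if_neg h2, if_pos (by simp at h ⊢; exact Or.inl h)]
        congr 1
        have hz : pvDeltaA toks rest = 0 := by
          have hfil : rest.filter (fun lp => toks.contains lp.1) = [] := by
            rw [List.filter_eq_nil_iff]; intro a ha hc
            exact h2 (List.any_eq_true.mpr ⟨a, ha, hc⟩)
          unfold pvDeltaA; rw [hfil]; rfl
        simp only [pvDeltaA, List.filter_cons, h, if_pos, List.map_cons, List.sum_cons]
        have hz' : ((rest.filter (fun lp => toks.contains lp.1)).map
            (fun lp => (6 - pvIdx toks lp.1) * lp.2)).sum = 0 := hz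
        rw [hz']; ring
    · rw [if_neg h]
      rw [ih]
      have : pvDeltaA toks (lp :: rest) = pvDeltaA toks rest := by
        unfold pvDeltaA
        rw [List.filter_cons, if_neg h]
      rw [this]
      by_cases h2 : rest.any (fun lp => toks.contains lp.1)
      · rw [if_pos h2, if_pos (by rw [Bool.or_eq_true]; exact Or.inr h2)]
      · rw [if_neg h2, if_neg (by rw [Bool.or_eq_true]; rintro (hc | hc) <;> [exact h hc; exact h2 hc])]

-- the summed-preference dict: membership
lemma contains_pvPrefOf (pairs : List (String × Int)) (v : String) :
    (pvPrefOf pairs).contains v = pairs.any (fun lp => lp.1 == v) := by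
  have gen : ∀ (pairs : List (String × Int)) (d : PySem.Dict String Int),
      (pairs.foldl (fun d lp => d.insert lp.1 (d.getD lp.1 0 + lp.2)) d).contains v
        = (pairs.any (fun lp => v == lp.1) || d.contains v) := by
    intro pairs
    induction pairs with
    | nil => simp
    | cons lp rest ih =>
      intro d
      simp only [List.foldl_cons, ih, PySem.Dict.contains_insert, List.any_cons]
      cases (v == lp.1) <;> cases (rest.any fun lp => v == lp.1) <;> simp
  unfold pvPrefOf
  rw [gen pairs PySem.Dict.empty]
  simp [BEq.comm]

-- B's seen-set pass over one row, characterised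
lemma foldB_char (d : PySem.Dict String Int) (toks : List String) :
    (PySem.List.enumerate toks).foldl
        (fun (st : PySem.Set String × Int × Bool) it =>
          if PySem.Set.contains st.1 it.2 then st
          else if d.contains it.2 then
            (PySem.Set.add st.1 it.2, st.2.1 + (6 - it.1) * d.getD it.2 0, true)
          else (PySem.Set.add st.1 it.2, st.2.1, st.2.2))
        (PySem.Set.empty, 0, false)
    = (PySem.Set.ofList toks, pvDeltaB d toks, toks.any (fun tok => d.contains tok)) := by
  induction toks using List.reverseRecOn with
  | nil => rfl
  | append_singleton toks x ih =>
    rw [PySem.List.enumerate_append, List.foldl_append, ih]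
    simp only [PySem.List.enumerate, List.foldl_cons, List.foldl_nil, zero_add]
    by_cases hx : x ∈ toks
    · have hc : PySem.Set.contains (PySem.Set.ofList toks) x = true :=
        (PySem.Set.contains_iff _ _).mpr ((PySem.Set.mem_ofList _ _).mpr hx)
      rw [if_pos hc]
      have h1 : PySem.Set.ofList (toks ++ [x]) = PySem.Set.ofList toks := by
        rw [PySem.Set.ofList_eq_foldl, List.foldl_append, ← PySem.Set.ofList_eq_foldl]
        simp [PySem.Set.add, hx]
      have h2 : pvDeltaB d (toks ++ [x]) = pvDeltaB d toks := by
        unfold pvDeltaB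
        rw [PySem.List.dedup_eq_ofList, PySem.List.dedup_eq_ofList, h1]
        refine congrArg _ (List.map_congr_left ?_)
        intro tok htok
        have htk : tok ∈ toks := (PySem.Set.mem_ofList _ _).mp htok
        unfold pvIdx
        rw [PySem.List.index?_append_of_mem _ htk]
      have h3 : (toks ++ [x]).any (fun tok => d.contains tok)
          = toks.any (fun tok => d.contains tok) := by
        rw [List.any_append]
        cases hdc : d.contains x
        · simp [hdc]
        · have : toks.any (fun tok => d.contains tok) = true :=
            List.any_eq_true.mpr ⟨x, hx, hdc⟩
          simp [this]
      rw [h1, h2, h3]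
    · have hc : PySem.Set.contains (PySem.Set.ofList toks) x = false := by
        rw [← Bool.not_eq_true]
        intro hcc
        exact hx ((PySem.Set.mem_ofList _ _).mp ((PySem.Set.contains_iff _ _).mp hcc))
      rw [if_neg (by rw [hc]; exact Bool.false_ne_true)]
      have h1 : PySem.Set.ofList (toks ++ [x]) = PySem.Set.add (PySem.Set.ofList toks) x := by
        rw [PySem.Set.ofList_eq_foldl, List.foldl_append, ← PySem.Set.ofList_eq_foldl]
        rfl
      have hded : PySem.List.dedup (toks ++ [x]) = PySem.List.dedup toks ++ [x] := by
        rw [PySem.List.dedup_eq_ofList, PySem.List.dedup_eq_ofList, h1]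
        simp [PySem.Set.add, hx]
      have hidx_new : pvIdx (toks ++ [x]) x = (toks.length : Int) := by
        unfold pvIdx
        rw [PySem.List.index?_append_singleton_self _ x hx]
        rfl
      have h2 : pvDeltaB d (toks ++ [x]) = pvDeltaB d toks + (6 - (toks.length : Int)) * d.getD x 0 := by
        unfold pvDeltaB
        rw [hded, List.map_append, List.sum_append]
        congr 1
        · refine congrArg _ (List.map_congr_left ?_)
          intro tok htok
          have htk : tok ∈ toks := by
            rw [PySem.List.dedup_eq_ofList] at htok
            exact (PySem.Set.mem_ofList _ _).mp htok
          unfold pvIdx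
          rw [PySem.List.index?_append_of_mem _ htk]
        · rw [List.map_singleton, List.sum_singleton, hidx_new]
      cases hdc : d.contains x
      · rw [if_neg (by exact Bool.false_ne_true)]
        have hget : d.getD x 0 = 0 := PySem.Dict.getD_of_not_contains _ _ hdc
        have h3 : (toks ++ [x]).any (fun tok => d.contains tok)
            = toks.any (fun tok => d.contains tok) := by
          rw [List.any_append]
          simp [hdc]
        rw [h1, h2, h3, hget, mul_zero, add_zero]
      · rw [if_pos rfl]
        have h3 : (toks ++ [x]).any (fun tok => d.contains tok) = true := by
          rw [List.any_append]
          simp [hdc]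
        rw [h1, h2, h3]

-- updating f at one element of a duplicate-free list shifts the mapped sum by the update
lemma sum_map_update {α : Type} (l : List α) (f g : α → Int) (v : α) (c : Int)
    (hnd : l.Nodup) (hv : v ∈ l) (hoff : ∀ x ∈ l, x ≠ v → g x = f x) (hat : g v = f v + c) :
    (l.map g).sum = (l.map f).sum + c := by
  induction l with
  | nil => cases hv
  | cons a t ih =>
    rcases List.mem_cons.mp hv with rfl | hvt
    · have ht : ∀ x ∈ t, g x = f x := fun x hxt =>
        hoff x (List.mem_cons_of_mem _ hxt) (fun he => (List.nodup_cons.mp hnd).1 (he ▸ hxt))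
      simp only [List.map_cons, List.sum_cons, hat, List.map_congr_left ht]
      ring
    · have ha : g a = f a := hoff a List.mem_cons_self
        (fun he => (List.nodup_cons.mp hnd).1 (he ▸ hvt))
      simp only [List.map_cons, List.sum_cons, ha,
        ih (List.nodup_cons.mp hnd).2 hvt (fun x hxt hne => hoff x (List.mem_cons_of_mem _ hxt) hne)]
      ring

-- summing (6 - first index) · (summed preference) over distinct tokens regroups A's per-pair sum
lemma deltaB_eq_deltaA (toks : List String) (pairs : List (String × Int)) :
    pvDeltaB (pvPrefOf pairs) toks = pvDeltaA toks pairs := by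
  induction pairs using List.reverseRecOn with
  | nil =>
    have : ∀ tok ∈ PySem.List.dedup toks, (6 - pvIdx toks tok) * (pvPrefOf []).getD tok 0 = 0 := by
      intro tok _
      simp [pvPrefOf]
    unfold pvDeltaB pvDeltaA
    rw [List.map_congr_left this]
    simp
  | append_singleton pairs lp ih =>
    have hpf : pvPrefOf (pairs ++ [lp])
        = (pvPrefOf pairs).insert lp.1 ((pvPrefOf pairs).getD lp.1 0 + lp.2) := by
      unfold pvPrefOf
      rw [List.foldl_append]
      rfl
    have hA : pvDeltaA toks (pairs ++ [lp])
        = pvDeltaA toks pairs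
          + (if toks.contains lp.1 then (6 - pvIdx toks lp.1) * lp.2 else 0) := by
      unfold pvDeltaA
      rw [List.filter_append, List.map_append, List.sum_append, List.filter_cons]
      by_cases h : toks.contains lp.1
      · rw [if_pos h, if_pos h]
        simp
      · rw [if_neg h, if_neg h]
        simp
    rw [hA, hpf, ← ih]
    by_cases h : toks.contains lp.1
    · rw [if_pos h]
      unfold pvDeltaB
      refine sum_map_update _ _ _ lp.1 _ ?_ ?_ ?_ ?_
      · rw [PySem.List.dedup_eq_ofList]
        exact PySem.Set.nodup_ofList _
      · rw [PySem.List.mem_dedup]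
        exact List.contains_iff_mem.mp h
      · intro x _ hne
        rw [PySem.Dict.getD_insert, if_neg hne]
      · rw [PySem.Dict.getD_insert_self]
        ring
    · rw [if_neg h, add_zero]
      unfold pvDeltaB
      refine congrArg _ (List.map_congr_left ?_)
      intro tok htok
      have hne : tok ≠ lp.1 := by
        intro he
        exact h (List.contains_iff_mem.mpr (he ▸ (PySem.List.mem_dedup _ _).mp htok))
      rw [PySem.Dict.getD_insert, if_neg hne]

lemma cond_eq (toks : List String) (pairs : List (String × Int)) :
    toks.any (fun tok => (pvPrefOf pairs).contains tok) = pairs.any (fun lp => toks.contains lp.1) := by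
  rw [Bool.eq_iff_iff]
  simp only [List.any_eq_true, contains_pvPrefOf, beq_iff_eq, List.contains_iff_mem]
  constructor
  · rintro ⟨tok, htok, lp, hlp, rfl⟩
    exact ⟨lp, hlp, htok⟩
  · rintro ⟨lp, hlp, hmem⟩
    exact ⟨lp.1, hmem, lp, hlp, rfl⟩

-- the two score dicts coincide
lemma score_eq (table : List String) (pairs : List (String × Int)) (sc : PySem.Dict String Int) :
    table.foldl (fun sc t =>
      pairs.foldl (fun sc lp =>
        if (PySem.Str.split₀ t).contains lp.1 then
          sc.insert ((PySem.Str.split₀ t).headD "")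
            ((6 - (((PySem.List.index? (PySem.Str.split₀ t) lp.1).getD 0 : Nat) : Int)) * lp.2
              + sc.getD ((PySem.Str.split₀ t).headD "") 0)
        else sc) sc) sc
    = table.foldl (fun sc t =>
      let toks := PySem.Str.split₀ t
      let st := (PySem.List.enumerate toks).foldl
        (fun (st : PySem.Set String × Int × Bool) it =>
          if PySem.Set.contains st.1 it.2 then st
          else if (pvPrefOf pairs).contains it.2 then
            (PySem.Set.add st.1 it.2, st.2.1 + (6 - it.1) * (pvPrefOf pairs).getD it.2 0, true)
          else (PySem.Set.add st.1 it.2, st.2.1, st.2.2))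
        (PySem.Set.empty, 0, false)
      if st.2.2 then sc.insert (toks.headD "") (sc.getD (toks.headD "") 0 + st.2.1) else sc) sc := by
  induction table generalizing sc with
  | nil => rfl
  | cons t rest ih =>
    simp only [List.foldl_cons]
    rw [ih]
    congr 1
    show pairs.foldl (fun sc lp =>
        if (PySem.Str.split₀ t).contains lp.1 then
          sc.insert ((PySem.Str.split₀ t).headD "")
            ((6 - pvIdx (PySem.Str.split₀ t) lp.1) * lp.2
              + sc.getD ((PySem.Str.split₀ t).headD "") 0)
        else sc) sc = _
    rw [rowA_shape]
    show _ = (if ((PySem.List.enumerate (PySem.Str.split₀ t)).foldl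
        (fun (st : PySem.Set String × Int × Bool) it =>
          if PySem.Set.contains st.1 it.2 then st
          else if (pvPrefOf pairs).contains it.2 then
            (PySem.Set.add st.1 it.2, st.2.1 + (6 - it.1) * (pvPrefOf pairs).getD it.2 0, true)
          else (PySem.Set.add st.1 it.2, st.2.1, st.2.2))
        (PySem.Set.empty, 0, false)).2.2 then _ else _)
    rw [foldB_char]
    rw [cond_eq (PySem.Str.split₀ t) pairs, deltaB_eq_deltaA (PySem.Str.split₀ t) pairs,
      add_comm (pvDeltaA (PySem.Str.split₀ t) pairs)]

-- head of a stable insertion sort = first extremal element (the common selection step)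
lemma headD_foldl_insertBy {α : Type} (before : α → α → Bool) (xs : List α) (d : α) :
    ((xs.foldl (fun acc x => PySem.List.insertBy before x acc) []).headD d)
    = (xs.foldl (fun acc x =>
        match acc with
        | none => some x
        | some m => if before x m then some x else some m) none).getD d := by
  have insertBy_cons : ∀ (x a : α) (as : List α),
      PySem.List.insertBy before x (a :: as)
        = if before x a then x :: a :: as else a :: PySem.List.insertBy before x as :=
    fun _ _ _ => rfl
  have aux1 : ∀ (rest : List α) (a : α) (as : List α), ∃ as',
      rest.foldl (fun acc x => PySem.List.insertBy before x acc) (a :: as)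
        = (rest.foldl (fun m x => if before x m then x else m) a) :: as' := by
    intro rest
    induction rest with
    | nil => exact fun a as => ⟨as, rfl⟩
    | cons x t ih =>
      intro a as
      simp only [List.foldl_cons, insertBy_cons]
      by_cases h : before x a
      · rw [if_pos h, if_pos h]
        exact ih x (a :: as)
      · rw [if_neg h, if_neg h]
        exact ih a (PySem.List.insertBy before x as)
  have aux2 : ∀ (rest : List α) (m : α),
      rest.foldl (fun acc x =>
        match acc with
        | none => some x
        | some m => if before x m then some x else some m) (some m)
        = some (rest.foldl (fun m x => if before x m then x else m) m) := by
    intro rest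
    induction rest with
    | nil => exact fun m => rfl
    | cons x t ih =>
      intro m
      simp only [List.foldl_cons]
      by_cases h : before x m
      · rw [if_pos h, if_pos h]
        exact ih x
      · rw [if_neg h, if_neg h]
        exact ih m
  cases xs with
  | nil => rfl
  | cons x t =>
    obtain ⟨as', hs⟩ := aux1 t x []
    simp only [List.foldl_cons]
    rw [show PySem.List.insertBy before x [] = [x] from rfl, hs, aux2]
    rfl

-- the selection step: head of the stable sort = Python min with the same key
lemma sel_eq (l : List (String × Int)) (p : String × Int) :
    ((PySem.List.sorted2 l (fun q => -q.2) (fun q => q.1)).headD p).1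
      = ((PySem.List.min2? l (fun q => -q.2) (fun q => q.1)).getD p).1 := by
  simp only [PySem.List.sorted2, PySem.List.min2?, Bool.false_eq_true, if_false]
  exact congrArg Prod.fst (headD_foldl_insertBy _ l p)

-- ===== VERDICT (by name: the statement is the Claim_ definition above) =====
theorem solution_spec : Claim_equal_solution := by
  intro table languages preference _ _
  show solution table languages preference = solution_alt table languages preference
  simp only [solution, solution_alt]
  rw [score_eq table (languages.zip preference) PySem.Dict.empty]
  exact sel_eq _ _
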